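-- pv_equiv track=rewrite | github.com/LucasAlegre/advent-of-code-2021 | day22.py | part2
-- ===== SOURCE A (Python) =====
-- def overlap(c1, c2):
--     (x0a, x1a, y0a, y1a, z0a, z1a) = c1
--     (x0b, x1b, y0b, y1b, z0b, z1b) = c2
--     return x0b <= x1a and x1b >= x0a and y0b <= y1a and y1b >= y0a and z0b <= z1a and z1b >= z0a
--
-- def cubes_subtract_gen(c1, c2):
--     if not overlap(c1, c2):
--         yield c1
--     else:
--         x0a, x1a, y0a, y1a, z0a, z1a = c1
--         x0b, x1b, y0b, y1b, z0b, z1b = c2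
--         if x0a < x0b:
--             yield (x0a, x0b - 1, y0a, y1a, z0a, z1a)
--             x0a = x0b
--         if x1a > x1b:
--             yield (x1b + 1, x1a, y0a, y1a, z0a, z1a)
--             x1a = x1b
--         if y0a < y0b:
--             yield (x0a, x1a, y0a, y0b - 1, z0a, z1a)
--             y0a = y0b
--         if y1a > y1b:
--             yield (x0a, x1a, y1b + 1, y1a, z0a, z1a)
--             y1a = y1b
--         if z0a < z0b:
--             yield (x0a, x1a, y0a, y1a, z0a, z0b - 1)
--             z0a = z0b
--         if z1a > z1b:
--             yield (x0a, x1a, y0a, y1a, z1b + 1, z1a)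
--             z1a = z1b
--
-- def num_cubes(c):
--     (x0, x1, y0, y1, z0, z1) = c
--     return (x1 - x0 + 1) * (y1 - y0 + 1) * (z1 - z0 + 1)
--
-- def part2(steps):
--     cubes = []
--     for s in steps:
--         cubes_aux = []
--         cmd, cube = s
--         for c in cubes:
--             cubes_aux.extend(cubes_subtract_gen(c, cube))
--         if cmd == 'on':
--             cubes_aux.append(cube)
--         cubes = cubes_aux
--     return sum(num_cubes(c) for c in cubes)
-- ===== SOURCE B (Python) =====
-- def _pieces(c, b):
--     # parts of c left after subtracting b, A-compatible split, in closed form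
--     (x0, x1, y0, y1, z0, z1) = c
--     (u0, u1, v0, v1, w0, w1) = b
--     if not (u0 <= x1 and u1 >= x0 and v0 <= y1 and v1 >= y0 and w0 <= z1 and w1 >= z0):
--         return [c]
--     mx0, mx1 = max(x0, u0), min(x1, u1)
--     my0, my1 = max(y0, v0), min(y1, v1)
--     out = []
--     if x0 < u0:
--         out.append((x0, u0 - 1, y0, y1, z0, z1))
--     if x1 > u1:
--         out.append((u1 + 1, x1, y0, y1, z0, z1))
--     if y0 < v0:
--         out.append((mx0, mx1, y0, v0 - 1, z0, z1))
--     if y1 > v1: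
--         out.append((mx0, mx1, v1 + 1, y1, z0, z1))
--     if z0 < w0:
--         out.append((mx0, mx1, my0, my1, z0, w0 - 1))
--     if z1 > w1:
--         out.append((mx0, mx1, my0, my1, w1 + 1, z1))
--     return out
--
--
-- def _volume(c):
--     (x0, x1, y0, y1, z0, z1) = c
--     return (x1 - x0 + 1) * (y1 - y0 + 1) * (z1 - z0 + 1)
--
--
-- def part2(steps):
--     # per 'on'-cube depth-first search over the later cubes; no global box list
--     boxes = [cube for _, cube in steps]
--     total = 0
--     for i, (cmd, cube) in enumerate(steps):
--         if cmd != 'on':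
--             continue
--         stack = [(cube, i + 1)]
--         while stack:
--             c, j = stack.pop()
--             if j == len(boxes):
--                 total += _volume(c)
--             else:
--                 for p in _pieces(c, boxes[j]):
--                     stack.append((p, j + 1))
--     return total
-- ===== Notes on version B (the rewrite author's own statement) =====
-- stated objective: alternative
-- what changed: B never maintains A's global evolving list of disjoint cuboids: for each 'on' step it computes the volume surviving the later steps directly by an explicit-stack depth-first search over the suffix of cubes (with the subtraction pieces in closed max/min form instead of A's mutate-and-yield generator), summing leaf volumes into one accumulator.
import Mathlib
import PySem

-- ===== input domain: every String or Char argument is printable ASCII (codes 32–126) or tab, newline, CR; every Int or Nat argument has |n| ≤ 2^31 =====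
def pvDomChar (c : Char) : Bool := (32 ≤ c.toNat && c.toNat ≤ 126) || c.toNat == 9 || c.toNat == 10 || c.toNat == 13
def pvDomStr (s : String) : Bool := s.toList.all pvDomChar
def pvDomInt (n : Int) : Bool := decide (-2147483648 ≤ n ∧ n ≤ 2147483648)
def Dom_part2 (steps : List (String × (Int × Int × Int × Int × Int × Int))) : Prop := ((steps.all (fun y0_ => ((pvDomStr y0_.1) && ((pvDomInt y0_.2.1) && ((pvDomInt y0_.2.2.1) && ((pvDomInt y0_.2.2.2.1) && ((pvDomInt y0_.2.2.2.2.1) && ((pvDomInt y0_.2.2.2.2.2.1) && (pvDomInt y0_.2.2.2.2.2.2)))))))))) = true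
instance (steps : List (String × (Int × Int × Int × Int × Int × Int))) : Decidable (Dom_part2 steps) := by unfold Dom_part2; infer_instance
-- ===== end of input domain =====

-- B never maintains A's global evolving list of cuboids: it sums, per 'on'-cube, the surviving
-- volume by an explicit-stack depth-first search over the later cubes (objective: alternative).

abbrev PvBox : Type := Int × Int × Int × Int × Int × Int

-- ===== PORT A =====
def pvOverlap (c1 c2 : PvBox) : Bool :=
  let (x0a, x1a, y0a, y1a, z0a, z1a) := c1
  let (x0b, x1b, y0b, y1b, z0b, z1b) := c2
  decide (x0b ≤ x1a) && decide (x1b ≥ x0a) && decide (y0b ≤ y1a) && decide (y1b ≥ y0a) &&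
    decide (z0b ≤ z1a) && decide (z1b ≥ z0a)

-- the generator: yields accumulate in order, the trimmed bounds are threaded exactly as mutated
def pvCubesSubtractGen (c1 c2 : PvBox) : List PvBox :=
  if !(pvOverlap c1 c2) then [c1]
  else
    let (x0a, x1a, y0a, y1a, z0a, z1a) := c1
    let (x0b, x1b, y0b, y1b, z0b, z1b) := c2
    let o1 := if x0a < x0b then [(x0a, x0b - 1, y0a, y1a, z0a, z1a)] else []
    let x0a := if x0a < x0b then x0b else x0a
    let o2 := if x1a > x1b then [(x1b + 1, x1a, y0a, y1a, z0a, z1a)] else []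
    let x1a := if x1a > x1b then x1b else x1a
    let o3 := if y0a < y0b then [(x0a, x1a, y0a, y0b - 1, z0a, z1a)] else []
    let y0a := if y0a < y0b then y0b else y0a
    let o4 := if y1a > y1b then [(x0a, x1a, y1b + 1, y1a, z0a, z1a)] else []
    let y1a := if y1a > y1b then y1b else y1a
    let o5 := if z0a < z0b then [(x0a, x1a, y0a, y1a, z0a, z0b - 1)] else []
    let z0a := if z0a < z0b then z0b else z0a
    let o6 := if z1a > z1b then [(x0a, x1a, y0a, y1a, z1b + 1, z1a)] else []
    o1 ++ o2 ++ o3 ++ o4 ++ o5 ++ o6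

def pvNumCubes (c : PvBox) : Int :=
  let (x0, x1, y0, y1, z0, z1) := c
  (x1 - x0 + 1) * (y1 - y0 + 1) * (z1 - z0 + 1)

def part2 (steps : List (String × (Int × Int × Int × Int × Int × Int))) : Int :=
  let cubes : List PvBox := steps.foldl (fun cubes s =>
    let cmd := s.1
    let cube := s.2
    let cubesAux := cubes.foldl (fun acc c => acc ++ pvCubesSubtractGen c cube) []
    if cmd == "on" then cubesAux ++ [cube] else cubesAux) []
  (cubes.map pvNumCubes).sum

-- ===== PORT B =====
-- the parts of c left after subtracting b (A-compatible split), in closed form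
def pvPieces (c b : PvBox) : List PvBox :=
  let (x0, x1, y0, y1, z0, z1) := c
  let (u0, u1, v0, v1, w0, w1) := b
  if !(decide (u0 ≤ x1) && decide (u1 ≥ x0) && decide (v0 ≤ y1) && decide (v1 ≥ y0) &&
      decide (w0 ≤ z1) && decide (w1 ≥ z0)) then [c]
  else
    let mx0 := max x0 u0
    let mx1 := min x1 u1
    let my0 := max y0 v0
    let my1 := min y1 v1
    (if x0 < u0 then [(x0, u0 - 1, y0, y1, z0, z1)] else []) ++
    (if x1 > u1 then [(u1 + 1, x1, y0, y1, z0, z1)] else []) ++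
    (if y0 < v0 then [(mx0, mx1, y0, v0 - 1, z0, z1)] else []) ++
    (if y1 > v1 then [(mx0, mx1, v1 + 1, y1, z0, z1)] else []) ++
    (if z0 < w0 then [(mx0, mx1, my0, my1, z0, w0 - 1)] else []) ++
    (if z1 > w1 then [(mx0, mx1, my0, my1, w1 + 1, z1)] else [])

def pvVolume (c : PvBox) : Int :=
  let (x0, x1, y0, y1, z0, z1) := c
  (x1 - x0 + 1) * (y1 - y0 + 1) * (z1 - z0 + 1)

-- the while-loop over the explicit stack; the stack's top (Python list's end) is the list head,
-- pieces are pushed so the last-appended piece is popped first; the 'length ≤ j' totality guard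
-- is Python's 'j == len(boxes)' (j never exceeds it on reachable states), boxes[j] is pyGetD;
-- the fuel argument is only a totality guard (7 ^ boxes.length bounds the loop's iterations:
-- each pop of (c, j) with j < boxes.length is replaced by at most 6 pieces one level deeper)
def pvLoop (boxes : List PvBox) : Nat → List (PvBox × Int) → Int → Int
  | _, [], total => total
  | 0, _ :: _, total => total
  | fuel + 1, (c, j) :: rest, total =>
    if (boxes.length : Int) ≤ j then pvLoop boxes fuel rest (total + pvVolume c)
    else pvLoop boxes fuel
      (((pvPieces c (PySem.List.pyGetD boxes j (0, 0, 0, 0, 0, 0))).map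
        (fun p => (p, j + 1))).reverse ++ rest) total

def part2_alt (steps : List (String × (Int × Int × Int × Int × Int × Int))) : Int :=
  let boxes : List PvBox := steps.map (fun s => s.2)
  (PySem.List.enumerate steps 0).foldl (fun total is =>
    if is.2.1 == "on" then pvLoop boxes (7 ^ boxes.length) [(is.2.2, is.1 + 1)] total else total) 0

-- ===== PRECONDITION & SPEC =====
def Spec_part2 (steps : List (String × (Int × Int × Int × Int × Int × Int))) (out : Int) : Prop := out = part2_alt steps
instance (steps : List (String × (Int × Int × Int × Int × Int × Int))) (out : Int) : Decidable (Spec_part2 steps out) := by unfold Spec_part2; infer_instance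

-- ===== CLAIM (what is proved, stated in full; the proofs are below) =====
def Claim_equal_part2 : Prop := ∀ (steps : List (String × (Int × Int × Int × Int × Int × Int))), Dom_part2 steps → Spec_part2 steps (part2 steps)

-- ===== LEMMAS AND PROOFS =====

theorem pvPieces_length_le (c b : PvBox) : (pvPieces c b).length ≤ 6 := by
  obtain ⟨x0, x1, y0, y1, z0, z1⟩ := c
  obtain ⟨u0, u1, v0, v1, w0, w1⟩ := b
  simp only [pvPieces]
  split_ifs <;> simp


-- A's mutate-and-yield generator emits exactly B's closed-form pieces
theorem pvPieces_eq_gen (c b : PvBox) : pvCubesSubtractGen c b = pvPieces c b := by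
  obtain ⟨x0, x1, y0, y1, z0, z1⟩ := c
  obtain ⟨u0, u1, v0, v1, w0, w1⟩ := b
  have h1 : ∀ a b : Int, (if a < b then b else a) = max a b := by
    intro a b; rw [Int.max_def]; split_ifs <;> omega
  have h2 : ∀ a b : Int, (if a > b then b else a) = min a b := by
    intro a b; rw [Int.min_def]; split_ifs <;> omega
  simp only [pvCubesSubtractGen, pvPieces, pvOverlap, h1, h2]

theorem pvVolume_eq (c : PvBox) : pvVolume c = pvNumCubes c := rfl

-- the remaining volume of box c after subtracting, in order, each box of the list
def pvRem : PvBox → List PvBox → Int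
  | c, [] => pvNumCubes c
  | c, b :: t => ((pvCubesSubtractGen c b).map (fun p => pvRem p t)).sum

-- the contribution of each 'on'-step: what remains of its cube after the later cubes
def pvPartB : List (String × PvBox) → Int
  | [] => 0
  | s :: t => (if s.1 == "on" then pvRem s.2 (t.map (fun x => x.2)) else 0) + pvPartB t

theorem pv_sum_map_flatMap (l : List PvBox) (f : PvBox → List PvBox) (g : PvBox → Int) :
    ((l.flatMap f).map g).sum = (l.map (fun c => ((f c).map g).sum)).sum := by
  induction l with
  | nil => simp
  | cons a t ih => simp [List.flatMap_cons, ih]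

-- the DFS stack loop, given fuel at least its measure, computes the summed remaining volumes
theorem pvLoop_eq (boxes : List PvBox) : ∀ (fuel : Nat) (stack : List (PvBox × Int)) (total : Int),
    (∀ p ∈ stack, 0 ≤ p.2) →
    (stack.map (fun cj => 7 ^ (((boxes.length : Int) - cj.2).toNat))).sum ≤ fuel →
    pvLoop boxes fuel stack total
      = total + (stack.map (fun p => pvRem p.1 (boxes.drop p.2.toNat))).sum := by
  intro fuel
  induction fuel with
  | zero =>
    intro stack total h hm
    cases stack with
    | nil => simp [pvLoop]
    | cons cj rest =>
      exfalso
      have h1 : 0 < 7 ^ (((boxes.length : Int) - cj.2).toNat) := Nat.pow_pos (by omega)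
      simp only [List.map_cons, List.sum_cons] at hm
      omega
  | succ fuel ih =>
    intro stack total h hm
    cases stack with
    | nil => simp [pvLoop]
    | cons cj rest =>
      obtain ⟨c, j⟩ := cj
      have hj : 0 ≤ j := h (c, j) List.mem_cons_self
      simp only [List.map_cons, List.sum_cons] at hm
      by_cases hle : (boxes.length : Int) ≤ j
      · simp only [pvLoop, if_pos hle]
        rw [ih rest (total + pvVolume c) (fun p hp => h p (List.mem_cons_of_mem _ hp))
          (by have h1 : 0 < 7 ^ (((boxes.length : Int) - j).toNat) := Nat.pow_pos (by omega); omega)]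
        have hdrop : boxes.drop (c, j).2.toNat = [] :=
          List.drop_eq_nil_of_le (by simp; omega)
        simp only [List.map_cons, List.sum_cons, hdrop]
        simp [pvRem, pvVolume_eq]
        ring
      · simp only [pvLoop, if_neg hle]
        have hb : PySem.List.pyGetD boxes j (0, 0, 0, 0, 0, 0) = boxes[j.toNat]'(by omega) := by
          rw [PySem.List.pyGetD_of_nonneg boxes _ hj, List.getD_eq_getElem?_getD,
            List.getElem?_eq_getElem (by omega)]
          rfl
        have hexp : (((boxes.length : Int) - j).toNat)
            = (((boxes.length : Int) - (j + 1)).toNat) + 1 := by omega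
        have hmeas : ((((pvPieces c (PySem.List.pyGetD boxes j (0, 0, 0, 0, 0, 0))).map
              (fun p => (p, j + 1))).reverse ++ rest).map
              (fun cj => 7 ^ (((boxes.length : Int) - cj.2).toNat))).sum ≤ fuel := by
          simp only [List.map_append, List.sum_append, List.map_reverse, List.sum_reverse,
            List.map_map, Function.comp_def]
          rw [PySem.List.sum_map_const_nat]
          have hlen := pvPieces_length_le c (PySem.List.pyGetD boxes j (0, 0, 0, 0, 0, 0))
          rw [hexp, pow_succ] at hm
          have hw : 0 < 7 ^ (((boxes.length : Int) - (j + 1)).toNat) := Nat.pow_pos (by omega)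
          have := Nat.mul_le_mul_right (7 ^ (((boxes.length : Int) - (j + 1)).toNat)) hlen
          omega
        rw [ih _ total ?hpos hmeas]
        case hpos =>
          intro p hp
          rcases List.mem_append.1 hp with hp | hp
          · rw [List.mem_reverse] at hp
            obtain ⟨q, _, rfl⟩ := List.mem_map.1 hp
            simp; omega
          · exact h p (List.mem_cons_of_mem _ hp)
        have hdrop : boxes.drop (c, j).2.toNat
            = boxes[j.toNat]'(by omega) :: boxes.drop (j.toNat + 1) :=
          List.drop_eq_getElem_cons (by omega)
        have htn : ∀ p : PvBox, ((p, j + 1) : PvBox × Int).2.toNat = j.toNat + 1 := by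
          intro p; simp; omega
        simp only [List.map_append, List.sum_append, List.map_reverse, List.sum_reverse,
          List.map_map, List.map_cons, List.sum_cons, hdrop]
        have hrem : pvRem c (boxes[j.toNat]'(by omega) :: boxes.drop (j.toNat + 1))
            = ((pvPieces c (PySem.List.pyGetD boxes j (0, 0, 0, 0, 0, 0))).map
                (fun p => pvRem p (boxes.drop (j.toNat + 1)))).sum := by
          rw [pvRem, pvPieces_eq_gen, hb]
        rw [hrem]
        have hmapeq : ((pvPieces c (PySem.List.pyGetD boxes j (0, 0, 0, 0, 0, 0))).map
              ((fun p => pvRem p.1 (boxes.drop p.2.toNat)) ∘ (fun p => (p, j + 1))))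
            = ((pvPieces c (PySem.List.pyGetD boxes j (0, 0, 0, 0, 0, 0))).map
              (fun p => pvRem p (boxes.drop (j.toNat + 1)))) := by
          apply List.map_congr_left
          intro p _
          simp only [Function.comp_apply]
          rw [htn p]
        rw [hmapeq]

-- A's whole fold, started from any box list L, splits into L's remaining volumes plus pvPartB
theorem pvA_main (steps : List (String × PvBox)) : ∀ (L : List PvBox),
    ((steps.foldl (fun cubes s =>
        let cmd := s.1
        let cube := s.2
        let cubesAux := cubes.foldl (fun acc c => acc ++ pvCubesSubtractGen c cube) []
        if cmd == "on" then cubesAux ++ [cube] else cubesAux) L).map pvNumCubes).sum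
      = (L.map (fun c => pvRem c (steps.map (fun s => s.2)))).sum + pvPartB steps := by
  induction steps with
  | nil =>
    intro L
    simp only [List.foldl_nil, List.map_nil, pvPartB]
    rw [add_zero]
    exact congrArg _ (List.map_congr_left fun c _ => by rw [pvRem])
  | cons s t ih =>
    intro L
    simp only [List.foldl_cons]
    have hflat : L.foldl (fun acc c => acc ++ pvCubesSubtractGen c s.2) []
        = L.flatMap (fun c => pvCubesSubtractGen c s.2) := by
      simpa using PySem.List.foldl_append_eq_flatMap (fun c => pvCubesSubtractGen c s.2) L []
    by_cases hon : (s.1 == "on") = true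
    · simp only [hon, if_pos, hflat]
      rw [ih]
      simp only [List.map_append, List.map_cons, List.map_nil, List.sum_append, List.sum_cons,
        List.sum_nil, pv_sum_map_flatMap, pvPartB, hon, if_pos]
      have : ∀ c : PvBox, ((pvCubesSubtractGen c s.2).map
            (fun p => pvRem p (t.map (fun x => x.2)))).sum
          = pvRem c (s.2 :: t.map (fun x => x.2)) := by
        intro c; rw [pvRem]
      rw [List.map_congr_left fun c _ => this c]
      ring
    · simp only [Bool.not_eq_true] at hon
      simp only [hon, Bool.false_eq_true, if_false, hflat]
      rw [ih]
      simp only [pv_sum_map_flatMap, pvPartB, hon, Bool.false_eq_true, if_false]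
      have : ∀ c : PvBox, ((pvCubesSubtractGen c s.2).map
            (fun p => pvRem p (t.map (fun x => x.2)))).sum
          = pvRem c (s.2 :: t.map (fun x => x.2)) := by
        intro c; rw [pvRem]
      rw [List.map_congr_left fun c _ => this c]
      simp only [List.map_cons]
      ring

-- B's enumerate fold, at any start index whose suffix of boxes matches, computes pvPartB
theorem pvB_main (t : List (String × PvBox)) : ∀ (boxes : List PvBox) (k : Int) (total : Int),
    0 ≤ k → boxes.drop k.toNat = t.map (fun s => s.2) →
    ((PySem.List.enumerate t k).foldl (fun total is =>
        if is.2.1 == "on" then pvLoop boxes (7 ^ boxes.length) [(is.2.2, is.1 + 1)] total else total) total)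
      = total + pvPartB t := by
  induction t with
  | nil => intro boxes k total _ _; simp [PySem.List.enumerate_nil, pvPartB]
  | cons s t ih =>
    intro boxes k total hk hdrop
    rw [PySem.List.enumerate_cons]
    simp only [List.foldl_cons]
    have htn : (k + 1).toNat = k.toNat + 1 := by omega
    have hdrop' : boxes.drop (k + 1).toNat = t.map (fun s => s.2) := by
      rw [htn, ← List.drop_drop, hdrop]
      simp
    by_cases hon : (s.1 == "on") = true
    · simp only [hon, if_pos]
      rw [pvLoop_eq boxes (7 ^ boxes.length) [(s.2, k + 1)] total
        (by intro p hp; simp at hp; subst hp; simp; omega)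
        (by
          simp only [List.map_cons, List.map_nil, List.sum_cons, List.sum_nil, add_zero]
          exact Nat.pow_le_pow_right (by omega) (by omega))]
      simp only [List.map_cons, List.map_nil, List.sum_cons, List.sum_nil, add_zero]
      rw [ih boxes (k + 1) _ (by omega) hdrop']
      simp only [pvPartB, hon, if_pos, hdrop']
      ring
    · simp only [Bool.not_eq_true] at hon
      simp only [hon, Bool.false_eq_true, if_false]
      rw [ih boxes (k + 1) total (by omega) hdrop']
      simp only [pvPartB, hon, Bool.false_eq_true, if_false]
      ring

-- ===== VERDICT (by name: the statement is the Claim_ definition above) =====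
theorem part2_spec : Claim_equal_part2 := by
  intro steps _
  unfold Spec_part2 part2 part2_alt
  rw [pvA_main steps []]
  rw [pvB_main steps (steps.map (fun s => s.2)) 0 0 (by omega) (by simp)]
  simp
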